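-- pv_equiv track=rewrite | github.com/chrisprideC9/404_finder | external_redirect.py | strip_path
-- ===== SOURCE A (Python) =====
-- def strip_path(path):
--     parts = path.split('/')
--     # Remove the last segment iteratively
--     while len(parts) > 1:
--         parts.pop()
--         new_path = '/'.join(parts)
--         if not new_path.startswith('/'):
--             new_path = '/' + new_path
--         yield new_path
-- ===== SOURCE B (Python) =====
-- def strip_path(path):
--     # Slice the immutable original at each '/' position, last to first.
--     slash_positions = [i for i, c in enumerate(path) if c == '/']
--     for i in reversed(slash_positions):
--         p = path[:i]
--         yield p if p.startswith('/') else '/' + p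
-- ===== Notes on version B (the rewrite author's own statement) =====
-- stated objective: simpler
-- what changed: Instead of repeatedly popping from a split-segment list and re-joining it each iteration, B records the separator positions of the original string once and yields a prefix slice (with the leading-slash fix) per position, from last to first.
import Mathlib
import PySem

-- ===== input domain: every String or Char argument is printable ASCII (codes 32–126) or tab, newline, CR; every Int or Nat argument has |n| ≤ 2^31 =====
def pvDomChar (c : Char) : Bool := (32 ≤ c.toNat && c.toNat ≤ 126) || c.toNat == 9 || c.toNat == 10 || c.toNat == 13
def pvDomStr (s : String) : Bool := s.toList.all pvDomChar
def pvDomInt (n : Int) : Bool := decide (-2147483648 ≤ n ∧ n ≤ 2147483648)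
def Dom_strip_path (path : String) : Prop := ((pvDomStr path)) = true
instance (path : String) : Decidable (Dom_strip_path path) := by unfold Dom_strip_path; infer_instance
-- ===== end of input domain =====

-- B replaces A's pop-and-rejoin loop over the split list by slicing the immutable
-- original string at each precomputed separator position, last to first (objective: simpler).

-- ===== PORT A =====
-- the while-loop: pop the last segment, '/'.join the rest, fix the leading slash, yield
def stripLoopA (parts : List (List Char)) : List String :=
  if 1 < parts.length then
    let parts' := parts.dropLast
    let new_path := PySem.Chars.join ['/'] parts'
    let new_path := if PySem.Chars.startswith new_path ['/'] then new_path else '/' :: new_path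
    String.ofList new_path :: stripLoopA parts'
  else []
termination_by parts.length
decreasing_by simp [List.length_dropLast]; omega

def strip_path (path : String) : List String :=
  stripLoopA (PySem.Chars.splitOn path.toList ['/'])

-- ===== PORT B =====
def strip_path_alt (path : String) : List String :=
  let cs := path.toList
  let slash_positions := (PySem.List.enumerate cs).filterMap
    (fun p => if p.2 = '/' then some p.1 else none)
  slash_positions.reverse.map (fun i =>
    let p := PySem.List.slice cs none (some i)
    String.ofList (if PySem.Chars.startswith p ['/'] then p else '/' :: p))

-- ===== PRECONDITION & SPEC =====
def Spec_strip_path (path : String) (out : List String) : Prop := out = strip_path_alt path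
instance (path : String) (out : List String) : Decidable (Spec_strip_path path out) := by unfold Spec_strip_path; infer_instance

-- ===== CLAIM (what is proved, stated in full; the proofs are below) =====
def Claim_equal_strip_path : Prop := ∀ (path : String), Dom_strip_path path → Spec_strip_path path (strip_path path)

-- ===== LEMMAS AND PROOFS =====

theorem splitOn_ne_nil' (cs : List Char) : cs.splitOn '/' ≠ [] := by
  unfold List.splitOn
  exact List.splitOnP_ne_nil _ _

theorem splitOn_cons (c : Char) (cs : List Char) :
    (c :: cs).splitOn '/' =
      if c = '/' then [] :: cs.splitOn '/' else (cs.splitOn '/').modifyHead (c :: ·) := by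
  simp only [List.splitOn, List.splitOnP_cons]
  by_cases hc : c = '/' <;> simp [hc]

theorem splitOn_go_eq (fuel : Nat) : ∀ (l cur : List Char) (accl : List (List Char)),
    l.length ≤ fuel →
    PySem.Chars.splitOn.go ['/'] fuel l cur accl
      = accl.reverse ++ (l.splitOn '/').modifyHead (cur.reverse ++ ·) := by
  induction fuel with
  | zero =>
    intro l cur accl h
    have hl : l = [] := by cases l <;> simp_all
    subst hl
    simp [PySem.Chars.splitOn.go, List.splitOn_nil, List.modifyHead]
  | succ f ih =>
    intro l cur accl h
    cases l with
    | nil => simp [PySem.Chars.splitOn.go, List.splitOn_nil, List.modifyHead]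
    | cons c rest =>
      by_cases hc : c = '/'
      · subst hc
        have hgo : PySem.Chars.splitOn.go ['/'] (f + 1) ('/' :: rest) cur accl
            = PySem.Chars.splitOn.go ['/'] f rest [] (cur.reverse :: accl) := by
          simp [PySem.Chars.splitOn.go, List.isPrefixOf]
        rw [hgo, ih rest [] _ (by simp at h; omega), splitOn_cons, if_pos rfl]
        cases hs : rest.splitOn '/' with
        | nil => exact absurd hs (splitOn_ne_nil' rest)
        | cons q qs => simp [List.modifyHead]
      · have hpre : (['/'].isPrefixOf (c :: rest)) = false := by
          simp [List.isPrefixOf]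
          exact fun e => hc e.symm
        have hgo : PySem.Chars.splitOn.go ['/'] (f + 1) (c :: rest) cur accl
            = PySem.Chars.splitOn.go ['/'] f rest (c :: cur) accl := by
          simp [PySem.Chars.splitOn.go, hpre]
        rw [hgo, ih rest (c :: cur) accl (by simp at h; omega), splitOn_cons, if_neg hc]
        cases hs : rest.splitOn '/' with
        | nil => exact absurd hs (splitOn_ne_nil' rest)
        | cons q qs => simp [List.modifyHead]

theorem splitOn_eq (cs : List Char) :
    PySem.Chars.splitOn cs ['/'] = cs.splitOn '/' := by
  unfold PySem.Chars.splitOn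
  rw [splitOn_go_eq (cs.length + 1) cs [] [] (by omega)]
  cases hs : cs.splitOn '/' with
  | nil => exact absurd hs (splitOn_ne_nil' cs)
  | cons q qs => simp [List.modifyHead]

theorem join_splitOn (cs : List Char) :
    PySem.Chars.join ['/'] (cs.splitOn '/') = cs := by
  show ['/'].intercalate (cs.splitOn '/') = cs
  exact List.intercalate_splitOn cs '/'

theorem splitOn_append_sep (cs : List Char) :
    (cs ++ ['/']).splitOn '/' = cs.splitOn '/' ++ [[]] := by
  induction cs with
  | nil => rfl
  | cons d rest ih =>
    rw [List.cons_append, splitOn_cons, splitOn_cons]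
    by_cases hd : d = '/'
    · simp [hd, ih]
    · simp only [if_neg hd, ih]
      cases hs : rest.splitOn '/' with
      | nil => exact absurd hs (splitOn_ne_nil' rest)
      | cons q qs => simp [List.modifyHead]

theorem dropLast_cons_congr {α : Type} (x : α) (ms ms' : List α) (h : ms ≠ []) (h' : ms' ≠ [])
    (hd : ms.dropLast = ms'.dropLast) : (x :: ms).dropLast = (x :: ms').dropLast := by
  cases ms with
  | nil => contradiction
  | cons a as =>
    cases ms' with
    | nil => contradiction
    | cons b bs => simpa using hd

theorem modifyHead_dropLast_congr (d : Char) (ms ms' : List (List Char)) (h : ms ≠ [])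
    (h' : ms' ≠ []) (hd : ms.dropLast = ms'.dropLast) :
    (ms.modifyHead (d :: ·)).dropLast = (ms'.modifyHead (d :: ·)).dropLast := by
  cases ms with
  | nil => contradiction
  | cons a as =>
    cases ms' with
    | nil => contradiction
    | cons b bs =>
      simp only [List.modifyHead]
      cases as with
      | nil =>
        cases bs with
        | nil => rfl
        | cons b2 bs2 => simp at hd
      | cons a2 as2 =>
        cases bs with
        | nil => simp at hd
        | cons b2 bs2 =>
          simp at hd
          simp [hd.1, hd.2]

theorem splitOn_dropLast_append (cs : List Char) (c : Char) (hc : c ≠ '/') :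
    ((cs ++ [c]).splitOn '/').dropLast = (cs.splitOn '/').dropLast := by
  induction cs with
  | nil => simp [splitOn_cons, hc, List.splitOn_nil, List.modifyHead]
  | cons d rest ih =>
    rw [List.cons_append, splitOn_cons, splitOn_cons]
    by_cases hd : d = '/'
    · simp only [if_pos hd]
      exact dropLast_cons_congr _ _ _ (splitOn_ne_nil' _) (splitOn_ne_nil' _) ih
    · simp only [if_neg hd]
      exact modifyHead_dropLast_congr d _ _ (splitOn_ne_nil' _) (splitOn_ne_nil' _) ih

theorem stripLoopA_congr (ps qs : List (List Char)) (hp : ps ≠ []) (hq : qs ≠ [])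
    (h : ps.dropLast = qs.dropLast) : stripLoopA ps = stripLoopA qs := by
  have hp1 : 0 < ps.length := List.length_pos_of_ne_nil hp
  have hq1 : 0 < qs.length := List.length_pos_of_ne_nil hq
  have hlen : ps.length = qs.length := by
    have := congrArg List.length h
    simp only [List.length_dropLast] at this
    omega
  conv_lhs => rw [stripLoopA]
  conv_rhs => rw [stripLoopA]
  rw [hlen, h]

-- positions of '/' in cs, counted from k
def slashIdx (cs : List Char) (k : Nat) : List Nat :=
  match cs with
  | [] => []
  | c :: rest => if c = '/' then k :: slashIdx rest (k + 1) else slashIdx rest (k + 1)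

theorem slashIdx_append (cs : List Char) (c : Char) : ∀ k,
    slashIdx (cs ++ [c]) k = slashIdx cs k ++ (if c = '/' then [k + cs.length] else []) := by
  induction cs with
  | nil => intro k; by_cases hc : c = '/' <;> simp [slashIdx, hc]
  | cons d rest ih =>
    intro k
    by_cases hd : d = '/' <;>
      simp [slashIdx, hd, ih (k + 1), Nat.add_assoc, Nat.add_comm 1 rest.length]

theorem slashIdx_lt (cs : List Char) : ∀ k i, i ∈ slashIdx cs k → i < k + cs.length := by
  induction cs with
  | nil => intro k i h; simp [slashIdx] at h
  | cons d rest ih =>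
    intro k i h
    by_cases hd : d = '/' <;> simp [slashIdx, hd] at h
    · rcases h with h | h
      · simp; omega
      · have := ih (k + 1) i h; simp; omega
    · have := ih (k + 1) i h; simp; omega

theorem enumerate_filter_eq (cs : List Char) : ∀ (k : Nat),
    (PySem.List.enumerate cs (k : Int)).filterMap (fun p => if p.2 = '/' then some p.1 else none)
      = (slashIdx cs k).map (fun n : Nat => (n : Int)) := by
  induction cs with
  | nil => intro k; simp [PySem.List.enumerate_nil, slashIdx]
  | cons c rest ih =>
    intro k
    rw [PySem.List.enumerate_cons, show ((k : Int) + 1) = ((k + 1 : Nat) : Int) by push_cast; ring,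
      List.filterMap_cons, ih (k + 1)]
    by_cases hc : c = '/' <;> simp [slashIdx, hc]

def coreFix (p : List Char) : List Char :=
  if PySem.Chars.startswith p ['/'] then p else '/' :: p

theorem main_eq (cs : List Char) :
    stripLoopA (cs.splitOn '/') =
      (slashIdx cs 0).reverse.map (fun n => String.ofList (coreFix (cs.take n))) := by
  induction cs using List.reverseRecOn with
  | nil =>
    rw [List.splitOn_nil]
    conv_lhs => rw [stripLoopA]
    simp [slashIdx]
  | append_singleton cs c ih =>
    by_cases hc : c = '/'
    · subst hc
      rw [splitOn_append_sep]
      have hne := splitOn_ne_nil' cs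
      have hpos : 0 < (cs.splitOn '/').length := List.length_pos_of_ne_nil hne
      have hlen : 1 < (cs.splitOn '/' ++ [[]]).length := by
        simp only [List.length_append, List.length_cons, List.length_nil]; omega
      conv_lhs => rw [stripLoopA]
      rw [if_pos hlen]
      simp only [List.dropLast_concat]
      rw [join_splitOn, ih]
      rw [slashIdx_append, if_pos rfl, List.reverse_append, List.reverse_singleton,
        List.singleton_append, List.map_cons, Nat.zero_add]
      refine congrArg₂ List.cons ?_ ?_
      · rw [List.take_left]
        simp [coreFix]
      · refine List.map_congr_left ?_
        intro n hn
        have hlt : n < cs.length := by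
          have := slashIdx_lt cs 0 n (List.mem_reverse.mp hn)
          omega
        rw [List.take_append_of_le_length (by omega)]
    · rw [stripLoopA_congr _ _ (splitOn_ne_nil' _) (splitOn_ne_nil' _)
        (splitOn_dropLast_append cs c hc), ih, slashIdx_append, if_neg hc, List.append_nil]
      refine List.map_congr_left ?_
      intro n hn
      have hlt : n < cs.length := by
        have := slashIdx_lt cs 0 n (List.mem_reverse.mp hn)
        omega
      rw [List.take_append_of_le_length (by omega)]

theorem rev_map_cast (l : List Nat) (g : Int → String) :
    ((l.map (fun n : Nat => (n : Int))).reverse).map g = l.reverse.map (fun n => g ((n : Nat) : Int)) := by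
  rw [← List.map_reverse, List.map_map]
  rfl

theorem alt_eq (path : String) :
    strip_path_alt path =
      (slashIdx path.toList 0).reverse.map (fun n => String.ofList (coreFix (path.toList.take n))) := by
  simp only [strip_path_alt]
  rw [show (0 : Int) = ((0 : Nat) : Int) by simp]
  rw [enumerate_filter_eq path.toList 0, rev_map_cast]
  refine List.map_congr_left ?_
  intro n hn
  simp [PySem.List.slice_to_natCast, coreFix]

-- ===== VERDICT (by name: the statement is the Claim_ definition above) =====
theorem strip_path_spec : Claim_equal_strip_path := by
  intro path _
  unfold Spec_strip_path
  rw [strip_path, splitOn_eq, main_eq, alt_eq]
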